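-- pv_equiv track=rewrite | github.com/Gaucho98/random-exercises | tp9 ej1.py | lectura_datos
-- ===== SOURCE A (Python) =====
-- def lectura_datos(legajos,notas):
--     mayor_4 = 0
--     menor_4 = 0
--     total = 0
--
--     for i in range(len(notas)):
--         if notas[i] >= 4 and notas[i] <= 10:
--             mayor_4 += 1
--
--     for i in range(len(notas)):
--         if notas[i] < 4 and notas[i] >= 0:
--             menor_4 += 1
--
--     for i in range(len(notas)):
--         total += notas[i]
--
--     cantidad_notas = mayor_4 + menor_4
--     promedio = total // cantidad_notas
--
--     return mayor_4, menor_4, promedio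
-- ===== SOURCE B (Python) =====
-- def lectura_datos(legajos, notas):
--     mayor_4 = 0
--     menor_4 = 0
--     total = 0
--     for n in notas:
--         if 4 <= n <= 10:
--             mayor_4 += 1
--         elif 0 <= n < 4:
--             menor_4 += 1
--         total += n
--     return mayor_4, menor_4, total // (mayor_4 + menor_4)
-- ===== Notes on version B (the rewrite author's own statement) =====
-- stated objective: simpler
-- what changed: B replaces A's three separate index-based passes over notas with a single value loop maintaining all three accumulators at once (classifying each grade into exactly one bucket with if/elif) and divides inline.
import Mathlib
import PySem

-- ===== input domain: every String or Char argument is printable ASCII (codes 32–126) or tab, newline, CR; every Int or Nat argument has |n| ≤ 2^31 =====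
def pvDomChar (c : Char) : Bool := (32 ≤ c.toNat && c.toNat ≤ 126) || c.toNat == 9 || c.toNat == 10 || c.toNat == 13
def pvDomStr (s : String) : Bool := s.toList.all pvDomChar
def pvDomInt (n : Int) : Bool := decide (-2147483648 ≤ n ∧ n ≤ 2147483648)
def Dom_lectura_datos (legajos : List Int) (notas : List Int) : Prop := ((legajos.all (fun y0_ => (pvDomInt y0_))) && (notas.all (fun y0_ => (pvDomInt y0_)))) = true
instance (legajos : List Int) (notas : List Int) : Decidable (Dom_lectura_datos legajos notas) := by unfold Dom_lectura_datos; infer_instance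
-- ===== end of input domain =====

-- B merges A's three index-based passes into one single value loop with three accumulators; return value only, no side effects.

-- ===== PORT A =====
-- three separate 'for i in range(len(notas))' loops, then 'total // cantidad_notas'
def lectura_datos (legajos : List Int) (notas : List Int) : Int × Int × Int :=
  let mayor_4 : Int := (PySem.List.pyRange 0 (notas.length : Int) 1).foldl
    (fun acc i => if 4 ≤ PySem.List.pyGetD notas i 0 ∧ PySem.List.pyGetD notas i 0 ≤ 10 then acc + 1 else acc) 0
  let menor_4 : Int := (PySem.List.pyRange 0 (notas.length : Int) 1).foldl
    (fun acc i => if PySem.List.pyGetD notas i 0 < 4 ∧ 0 ≤ PySem.List.pyGetD notas i 0 then acc + 1 else acc) 0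
  let total : Int := (PySem.List.pyRange 0 (notas.length : Int) 1).foldl
    (fun acc i => acc + PySem.List.pyGetD notas i 0) 0
  let cantidad_notas := mayor_4 + menor_4
  let promedio := PySem.Int.floordiv total cantidad_notas
  (mayor_4, menor_4, promedio)

-- ===== PORT B =====
-- one loop over the grades themselves, three accumulators updated together
def lectura_datos_alt (legajos : List Int) (notas : List Int) : Int × Int × Int :=
  let s : Int × Int × Int := notas.foldl
    (fun s n =>
      if 4 ≤ n ∧ n ≤ 10 then (s.1 + 1, s.2.1, s.2.2 + n)
      else if 0 ≤ n ∧ n < 4 then (s.1, s.2.1 + 1, s.2.2 + n)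
      else (s.1, s.2.1, s.2.2 + n))
    (0, 0, 0)
  (s.1, s.2.1, PySem.Int.floordiv s.2.2 (s.1 + s.2.1))

-- ===== PRECONDITION & SPEC =====
-- Pre_ excludes exactly the inputs where no grade lies in [0,10]: there cantidad_notas = 0 and
-- Python A raises ZeroDivisionError (B raises the same way).
def Pre_lectura_datos (legajos : List Int) (notas : List Int) : Prop :=
  ∃ n ∈ notas, 0 ≤ n ∧ n ≤ 10
instance (legajos : List Int) (notas : List Int) : Decidable (Pre_lectura_datos legajos notas) := by
  unfold Pre_lectura_datos; infer_instance
def pvWitness_lectura_datos : List Int × List Int := ([1, 2], [7, 3, -1])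

def Spec_lectura_datos (legajos : List Int) (notas : List Int) (out : Int × Int × Int) : Prop := out = lectura_datos_alt legajos notas
instance (legajos : List Int) (notas : List Int) (out : Int × Int × Int) : Decidable (Spec_lectura_datos legajos notas out) := by unfold Spec_lectura_datos; infer_instance

-- ===== CLAIM (what is proved, stated in full; the proofs are below) =====
def Claim_equal_lectura_datos : Prop := ∀ (legajos : List Int) (notas : List Int), Dom_lectura_datos legajos notas → Pre_lectura_datos legajos notas → Spec_lectura_datos legajos notas (lectura_datos legajos notas)

-- ===== LEMMAS AND PROOFS =====

-- B's single loop computes the two counts and the sum of A's three loops.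
theorem alt_foldl_eq (notas : List Int) (m me t : Int) :
    notas.foldl
      (fun s n =>
        if 4 ≤ n ∧ n ≤ 10 then (s.1 + 1, s.2.1, s.2.2 + n)
        else if 0 ≤ n ∧ n < 4 then (s.1, s.2.1 + 1, s.2.2 + n)
        else (s.1, s.2.1, s.2.2 + n))
      (m, me, t)
    = (m + (notas.countP (fun n => decide (4 ≤ n ∧ n ≤ 10)) : Int),
       me + (notas.countP (fun n => decide (n < 4 ∧ 0 ≤ n)) : Int),
       t + notas.sum) := by
  induction notas generalizing m me t with
  | nil => simp
  | cons n ns ih =>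
    simp only [List.foldl_cons, List.countP_cons, List.sum_cons]
    by_cases h1 : 4 ≤ n ∧ n ≤ 10
    · have h2 : ¬ (n < 4 ∧ 0 ≤ n) := by omega
      simp [h1, h2, ih, Prod.ext_iff]; omega
    · by_cases h2 : 0 ≤ n ∧ n < 4
      · have h2' : n < 4 ∧ 0 ≤ n := ⟨h2.2, h2.1⟩
        simp [h1, h2, h2', ih, Prod.ext_iff]; omega
      · have h2' : ¬ (n < 4 ∧ 0 ≤ n) := fun h => h2 ⟨h.2, h.1⟩
        simp [h1, h2, h2', ih, Prod.ext_iff]; omega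

-- ===== VERDICT (by name: the statement is the Claim_ definition above) =====
theorem lectura_datos_spec : Claim_equal_lectura_datos := by
  intro legajos notas _ _
  unfold Spec_lectura_datos lectura_datos lectura_datos_alt
  rw [PySem.List.foldl_pyRange_zero_pyGetD' notas 0
        (fun acc x => if 4 ≤ x ∧ x ≤ 10 then acc + 1 else acc) 0,
      PySem.List.foldl_pyRange_zero_pyGetD' notas 0
        (fun acc x => if x < 4 ∧ 0 ≤ x then acc + 1 else acc) 0,
      PySem.List.foldl_pyRange_zero_pyGetD' notas 0 (fun acc x => acc + x) 0,
      alt_foldl_eq notas 0 0 0]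
  have ht : notas.foldl (fun acc x => acc + x) 0 = notas.sum := by
    simpa using PySem.List.foldl_add (l := notas) (g := id) (a := 0)
  simp [ht, PySem.List.foldl_ite_add_one]
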